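-- pv_equiv track=rewrite | github.com/Lorecrafter1590/CodeWars | Multi-Tap_Keypad_Text_entry.py | presses
-- ===== SOURCE A (Python) =====
-- def presses(phrase):
--     phrase = phrase.lower()
--     tap_counter = []
--     one_tap_array = ['a','d','g','j','m','p','t','w','*',' ','#','1']
--     two_tap_array = ['b','e','h','k','n','q','u','x','0']
--     three_tap_array = ['c','f','i','l','o','r','v','y']
--     four_tap_array = ['2','3','4','5','6','s','8','z']
--     five_tap_array = ['7','9']
--     for x in phrase:
--         if any(element in x for element in one_tap_array):
--             tap_counter.append(1)
--         elif any(element in x for element in two_tap_array):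
--             tap_counter.append(2)
--         elif any(element in x for element in three_tap_array):
--             tap_counter.append(3)
--         elif any(element in x for element in four_tap_array):
--             tap_counter.append(4)
--         elif any(element in x for element in five_tap_array):
--             tap_counter.append(5)
--     return sum(tap_counter)
-- ===== SOURCE B (Python) =====
-- def presses(phrase):
--     counts = {}
--     for c in phrase.lower():
--         counts[c] = counts.get(c, 0) + 1
--     total = 0
--     for n, group in enumerate(("adgjmptw* #1", "behknqux0", "cfilorvy", "23456s8z", "79"), 1):
--         for c in group:
--             total += n * counts.get(c, 0)
--     return total
-- ===== Notes on version B (the rewrite author's own statement) =====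
-- stated objective: faster
-- what changed: Inverts the iteration: builds a frequency histogram of the phrase once, then loops over the fixed five keypad groups summing weight times character frequency, instead of classifying each phrase character through an if/elif ladder of list scans.
import Mathlib
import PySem

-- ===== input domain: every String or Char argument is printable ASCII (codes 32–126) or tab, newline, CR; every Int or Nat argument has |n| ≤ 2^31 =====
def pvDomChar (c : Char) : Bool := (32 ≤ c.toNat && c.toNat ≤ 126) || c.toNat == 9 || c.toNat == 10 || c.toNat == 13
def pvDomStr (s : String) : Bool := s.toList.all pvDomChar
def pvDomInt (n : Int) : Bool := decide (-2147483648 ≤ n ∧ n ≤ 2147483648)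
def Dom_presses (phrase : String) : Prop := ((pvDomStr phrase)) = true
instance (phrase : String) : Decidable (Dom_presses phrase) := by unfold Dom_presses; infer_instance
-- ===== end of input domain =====

-- B inverts the iteration: a frequency histogram of the phrase built once, then one pass over
-- the five fixed keypad groups summing weight × frequency (objective: faster, measured).

-- ===== PORT A =====
def oneTapArray : List Char := ['a','d','g','j','m','p','t','w','*',' ','#','1']
def twoTapArray : List Char := ['b','e','h','k','n','q','u','x','0']
def threeTapArray : List Char := ['c','f','i','l','o','r','v','y']
def fourTapArray : List Char := ['2','3','4','5','6','s','8','z']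
def fiveTapArray : List Char := ['7','9']

-- each x is a 1-char string in Python; 'element in x' for 1-char element is exactly equality
def presses (phrase : String) : Int :=
  let p := PySem.Str.lower phrase
  let tapCounter := p.toList.foldl (fun acc x =>
    if oneTapArray.any (fun e => e == x) then acc ++ [(1 : Int)]
    else if twoTapArray.any (fun e => e == x) then acc ++ [2]
    else if threeTapArray.any (fun e => e == x) then acc ++ [3]
    else if fourTapArray.any (fun e => e == x) then acc ++ [4]
    else if fiveTapArray.any (fun e => e == x) then acc ++ [5]
    else acc) []
  tapCounter.foldl (· + ·) 0

-- ===== PORT B =====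
def pressesGroups : List String := ["adgjmptw* #1", "behknqux0", "cfilorvy", "23456s8z", "79"]

def presses_alt (phrase : String) : Int :=
  -- counts = {}; for c in phrase.lower(): counts[c] = counts.get(c, 0) + 1
  let counts := (PySem.Str.lower phrase).toList.foldl
    (fun d c => d.insert c (d.getD c 0 + 1)) (PySem.Dict.empty : PySem.Dict Char Int)
  -- for n, group in enumerate(groups, 1): for c in group: total += n * counts.get(c, 0)
  (PySem.List.enumerate pressesGroups 1).foldl
    (fun total ng => ng.2.toList.foldl (fun t c => t + ng.1 * counts.getD c 0) total) 0

-- ===== PRECONDITION & SPEC =====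
def Spec_presses (phrase : String) (out : Int) : Prop := out = presses_alt phrase
instance (phrase : String) (out : Int) : Decidable (Spec_presses phrase out) := by unfold Spec_presses; infer_instance

-- ===== CLAIM =====
def Claim_equal_presses : Prop := ∀ (phrase : String), Dom_presses phrase → Spec_presses phrase (presses phrase)

-- ===== LEMMAS AND PROOFS =====
set_option maxRecDepth 4000

def tapVal (c : Char) : Int :=
  if oneTapArray.any (fun e => e == c) then 1
  else if twoTapArray.any (fun e => e == c) then 2
  else if threeTapArray.any (fun e => e == c) then 3
  else if fourTapArray.any (fun e => e == c) then 4
  else if fiveTapArray.any (fun e => e == c) then 5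
  else 0

def allMapped : List Char :=
  oneTapArray ++ twoTapArray ++ threeTapArray ++ fourTapArray ++ fiveTapArray

-- B's nested fold with the histogram of l (the core of presses_alt)
def tableSum (l : List Char) : Int :=
  let counts := l.foldl (fun d c => d.insert c (d.getD c 0 + 1))
    (PySem.Dict.empty : PySem.Dict Char Int)
  (PySem.List.enumerate pressesGroups 1).foldl
    (fun total ng => ng.2.toList.foldl (fun t c => t + ng.1 * counts.getD c 0) total) 0

theorem presses_alt_eq (phrase : String) :
    presses_alt phrase = tableSum (PySem.Str.lower phrase).toList := rfl

theorem tapVal_indicator (c : Char) :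
    tapVal c =
      1 * (oneTapArray.count c : Int) + 2 * (twoTapArray.count c : Int)
      + 3 * (threeTapArray.count c : Int) + 4 * (fourTapArray.count c : Int)
      + 5 * (fiveTapArray.count c : Int) := by
  by_cases h : c ∈ allMapped
  · fin_cases h <;> decide
  · simp only [allMapped, List.append_assoc, List.mem_append, not_or] at h
    obtain ⟨h1, h2, h3, h4, h5⟩ := h
    rw [List.count_eq_zero.mpr h1, List.count_eq_zero.mpr h2, List.count_eq_zero.mpr h3,
      List.count_eq_zero.mpr h4, List.count_eq_zero.mpr h5]
    simp only [tapVal, List.any_beq', List.contains_eq_mem]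
    simp [h1, h2, h3, h4, h5]

theorem tableSum_expand (l : List Char) :
    tableSum l =
      (oneTapArray.map (fun c => 1 * (l.count c : Int))).sum
      + (twoTapArray.map (fun c => 2 * (l.count c : Int))).sum
      + (threeTapArray.map (fun c => 3 * (l.count c : Int))).sum
      + (fourTapArray.map (fun c => 4 * (l.count c : Int))).sum
      + (fiveTapArray.map (fun c => 5 * (l.count c : Int))).sum := by
  have e : PySem.List.enumerate pressesGroups 1 =
      [((1:Int),"adgjmptw* #1"),(2,"behknqux0"),(3,"cfilorvy"),(4,"23456s8z"),(5,"79")] := rfl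
  have g1 : ("adgjmptw* #1" : String).toList = ['a','d','g','j','m','p','t','w','*',' ','#','1'] := rfl
  have g2 : ("behknqux0" : String).toList = ['b','e','h','k','n','q','u','x','0'] := rfl
  have g3 : ("cfilorvy" : String).toList = ['c','f','i','l','o','r','v','y'] := rfl
  have g4 : ("23456s8z" : String).toList = ['2','3','4','5','6','s','8','z'] := rfl
  have g5 : ("79" : String).toList = ['7','9'] := rfl
  simp only [tableSum, PySem.Dict.getD_foldl_insert_add_one, e, g1, g2, g3, g4, g5,
    List.foldl_cons, List.foldl_nil, oneTapArray, twoTapArray, threeTapArray, fourTapArray,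
    fiveTapArray, List.map_cons, List.map_nil, List.sum_cons, List.sum_nil]
  simp only [PySem.Dict.getD_empty]
  ring

theorem mapTapVal_expand (l : List Char) :
    (l.map tapVal).sum =
      (oneTapArray.map (fun c => 1 * (l.count c : Int))).sum
      + (twoTapArray.map (fun c => 2 * (l.count c : Int))).sum
      + (threeTapArray.map (fun c => 3 * (l.count c : Int))).sum
      + (fourTapArray.map (fun c => 4 * (l.count c : Int))).sum
      + (fiveTapArray.map (fun c => 5 * (l.count c : Int))).sum := by
  induction l with
  | nil => simp
  | cons c l ih =>
    have hcount : ∀ (g : List Char) (k : Int),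
        (g.map (fun c' => k * ((c :: l).count c' : Int))).sum
        = (g.map (fun c' => k * (l.count c' : Int))).sum + k * (g.count c : Int) := by
      intro g k
      induction g with
      | nil => simp
      | cons d g ihg =>
        simp only [List.map_cons, List.sum_cons]
        rw [ihg]
        have hd : (((c :: l).count d : Nat) : Int)
            = (l.count d : Int) + (if d = c then 1 else 0) := by
          rw [List.count_cons]
          by_cases h : d = c
          · simp [h]
          · simp [h]
            exact fun hh => h hh.symm
        have hg : ((d :: g).count c : Int) = (g.count c : Int) + (if d = c then 1 else 0) := by
          rw [List.count_cons]
          by_cases h : d = c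
          · simp [h]
          · simp [h]
        rw [hd, hg]
        ring
    simp only [List.map_cons, List.sum_cons, hcount, ih, tapVal_indicator c]
    ring

theorem foldlA_sum (l : List Char) (acc : List Int) :
    (l.foldl (fun acc x =>
      if oneTapArray.any (fun e => e == x) then acc ++ [(1 : Int)]
      else if twoTapArray.any (fun e => e == x) then acc ++ [2]
      else if threeTapArray.any (fun e => e == x) then acc ++ [3]
      else if fourTapArray.any (fun e => e == x) then acc ++ [4]
      else if fiveTapArray.any (fun e => e == x) then acc ++ [5]
      else acc) acc).foldl (· + ·) 0
    = acc.foldl (· + ·) 0 + (l.map tapVal).sum := by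
  induction l generalizing acc with
  | nil => simp
  | cons c l ih =>
    simp only [List.foldl_cons, List.map_cons, List.sum_cons]
    rw [ih]
    unfold tapVal
    split_ifs <;> simp [List.foldl_append] <;> ring

-- ===== VERDICT =====
theorem presses_spec : Claim_equal_presses := by
  intro phrase _
  unfold Spec_presses presses
  rw [presses_alt_eq, tableSum_expand, ← mapTapVal_expand]
  simpa using foldlA_sum (PySem.Str.lower phrase).toList []
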